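-- pv_equiv track=rewrite | github.com/multivac61/aoc | year/2017.py | get_all_orientations
-- ===== SOURCE A (Python) =====
-- def rotate_pattern(pattern):
--     """Rotate pattern 90 degrees clockwise."""
--     size = len(pattern)
--     rotated = []
--     for i in range(size):
--         row = ""
--         for j in range(size):
--             row += pattern[size - 1 - j][i]
--         rotated.append(row)
--     return tuple(rotated)
--
-- def flip_pattern(pattern):
--     """Flip pattern horizontally."""
--     return tuple(row[::-1] for row in pattern)
--
-- def get_all_orientations(pattern):
--     """Get all possible orientations of a pattern."""
--     orientations = set()
--     current = pattern
--
--     for _ in range(4):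
--         orientations.add(current)
--         orientations.add(flip_pattern(current))
--         current = rotate_pattern(current)
--
--     return orientations
-- ===== SOURCE B (Python) =====
-- def get_all_orientations(pattern):
--     """Get all possible orientations of a pattern."""
--     n = len(pattern)
--
--     def build(f):
--         # materialise one orientation directly from its D4 coordinate map
--         return tuple("".join(pattern[f(i, j)[0]][f(i, j)[1]] for j in range(n))
--                      for i in range(n))
--
--     flipped = tuple(row[::-1] for row in pattern)
--     rot90 = build(lambda i, j: (n - 1 - j, i))
--     transpose = build(lambda i, j: (j, i))
--     rot180 = build(lambda i, j: (n - 1 - i, n - 1 - j))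
--     flip_vert = build(lambda i, j: (n - 1 - i, j))
--     rot270 = build(lambda i, j: (j, n - 1 - i))
--     anti_transpose = build(lambda i, j: (n - 1 - j, n - 1 - i))
--     return {pattern, flipped, rot90, transpose, rot180, flip_vert, rot270,
--             anti_transpose}
-- ===== Notes on version B (the rewrite author's own statement) =====
-- stated objective: alternative
-- what changed: B does not iterate the rotation at all: it materialises each of the eight dihedral-group orientations in one shot from its own closed-form coordinate map (i,j)->(source row, source col) applied to the original pattern, instead of A's loop that generates orientations by repeatedly composing rotate and flip.
import Mathlib
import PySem

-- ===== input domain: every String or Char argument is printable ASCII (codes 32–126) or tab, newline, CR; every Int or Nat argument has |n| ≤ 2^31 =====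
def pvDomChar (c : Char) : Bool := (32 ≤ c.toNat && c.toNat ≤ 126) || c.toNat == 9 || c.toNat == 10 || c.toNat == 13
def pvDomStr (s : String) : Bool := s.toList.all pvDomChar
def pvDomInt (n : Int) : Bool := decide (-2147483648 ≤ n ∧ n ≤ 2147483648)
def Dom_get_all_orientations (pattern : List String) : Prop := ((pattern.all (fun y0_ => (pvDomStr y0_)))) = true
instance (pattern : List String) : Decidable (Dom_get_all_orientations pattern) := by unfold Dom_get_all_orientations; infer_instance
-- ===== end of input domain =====

-- B builds each of the eight dihedral orientations directly from its own closed-form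
-- coordinate map on the original pattern, instead of A's loop composing rotate/flip;
-- alternative algorithm, same cost.

-- ===== PORT A =====
def rotate_pattern (pattern : List String) : List String :=
  let size := pattern.length
  (List.range size).foldl (fun rotated i =>
    rotated ++ [String.ofList ((List.range size).foldl (fun row j =>
      row ++ [((pattern.getD (size - 1 - j) "").toList.getD i ' ')]) [])]) []

def flip_pattern (pattern : List String) : List String :=
  pattern.map (fun row => String.ofList row.toList.reverse)

def get_all_orientations (pattern : List String) : List (List String) :=
  ((List.range 4).foldl (fun st _ =>
    (PySem.Set.add (PySem.Set.add st.1 st.2) (flip_pattern st.2), rotate_pattern st.2))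
    (((PySem.Set.empty : PySem.Set (List String))), pattern)).1

-- ===== PORT B =====
-- build(f) = tuple("".join(pattern[f(i,j)[0]][f(i,j)[1]] for j in range(n)) for i in range(n));
-- both indexings are total-ised with getD — inside Pre_ they are always in range.
def buildB (n : Nat) (pattern : List String) (f : Nat → Nat → Nat × Nat) : List String :=
  (List.range n).map (fun i =>
    String.ofList ((List.range n).map (fun j =>
      (pattern.getD (f i j).1 "").toList.getD (f i j).2 ' ')))

def get_all_orientations_alt (pattern : List String) : List (List String) :=
  let n := pattern.length
  let flipped := pattern.map (fun row => String.ofList row.toList.reverse)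
  let rot90 := buildB n pattern (fun i j => (n - 1 - j, i))
  let transpose := buildB n pattern (fun i j => (j, i))
  let rot180 := buildB n pattern (fun i j => (n - 1 - i, n - 1 - j))
  let flip_vert := buildB n pattern (fun i j => (n - 1 - i, j))
  let rot270 := buildB n pattern (fun i j => (j, n - 1 - i))
  let anti_transpose := buildB n pattern (fun i j => (n - 1 - j, n - 1 - i))
  [pattern, flipped, rot90, transpose, rot180, flip_vert, rot270, anti_transpose].foldl
    PySem.Set.add PySem.Set.empty

-- ===== PRECONDITION & SPEC =====
-- A raises IndexError in rotate_pattern unless every row has at least len(pattern)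
-- characters; Pre_ admits exactly the inputs on which A returns (B raises there too).
def Pre_get_all_orientations (pattern : List String) : Prop :=
  ∀ r ∈ pattern, pattern.length ≤ r.toList.length

instance (pattern : List String) : Decidable (Pre_get_all_orientations pattern) := by
  unfold Pre_get_all_orientations; infer_instance

def pvWitness_get_all_orientations : List String := ["ab", "cd"]

def Spec_get_all_orientations (pattern : List String) (out : List (List String)) : Prop := out = get_all_orientations_alt pattern
instance (pattern : List String) (out : List (List String)) : Decidable (Spec_get_all_orientations pattern out) := by unfold Spec_get_all_orientations; infer_instance

-- ===== CLAIM (what is proved, stated in full; the proofs are below) =====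
def Claim_equal_get_all_orientations : Prop := ∀ (pattern : List String), Dom_get_all_orientations pattern → Pre_get_all_orientations pattern → Spec_get_all_orientations pattern (get_all_orientations pattern)

-- ===== LEMMAS AND PROOFS =====

-- A's index-arithmetic double loop as a map over row indices
theorem rotA_as_map (p : List String) :
    rotate_pattern p = (List.range p.length).map (fun i =>
      String.ofList ((List.range p.length).map (fun j =>
        (p.getD (p.length - 1 - j) "").toList.getD i ' '))) := by
  simp only [rotate_pattern, PySem.List.foldl_append_singleton_eq_map, List.nil_append]

theorem rotate_eq_buildB (p : List String) :
    rotate_pattern p = buildB p.length p (fun i j => (p.length - 1 - j, i)) := by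
  rw [rotA_as_map]; rfl

theorem buildB_congr (n : Nat) (p : List String) (f f' : Nat → Nat → Nat × Nat)
    (h : ∀ i < n, ∀ j < n, f i j = f' i j) : buildB n p f = buildB n p f' := by
  unfold buildB
  refine List.map_congr_left ?_
  intro i hi
  rw [List.mem_range] at hi
  congr 1
  refine List.map_congr_left ?_
  intro j hj
  rw [List.mem_range] at hj
  rw [h i hi j hj]

theorem flip_buildB (n : Nat) (p : List String) (f : Nat → Nat → Nat × Nat) :
    flip_pattern (buildB n p f) = buildB n p (fun i j => f i (n - 1 - j)) := by
  unfold flip_pattern buildB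
  rw [List.map_map]
  refine List.map_congr_left ?_
  intro i _
  simp only [Function.comp]
  congr 1
  apply List.ext_getElem
  · simp
  intro k hk hk'
  simp only [List.length_map, List.length_range] at hk hk'
  simp [List.getElem_reverse]

theorem getD_map_range {α : Type} (n k : Nat) (hk : k < n) (g : Nat → α) (d : α) :
    (((List.range n).map g).getD k d) = g k := by
  rw [List.getD_eq_getElem _ _ (by simpa using hk)]
  simp

theorem rotate_buildB (n : Nat) (p : List String) (f : Nat → Nat → Nat × Nat)
    (hn : n = p.length) :
    rotate_pattern (buildB n p f) = buildB n p (fun i j => f (n - 1 - j) i) := by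
  have hlen : (buildB n p f).length = n := by simp [buildB]
  rw [rotA_as_map, hlen]
  unfold buildB
  refine List.map_congr_left ?_
  intro i hi
  rw [List.mem_range] at hi
  congr 1
  refine List.map_congr_left ?_
  intro j hj
  rw [List.mem_range] at hj
  have hidx : n - 1 - j < n := by omega
  rw [getD_map_range n (n - 1 - j) hidx]
  simp only [String.toList_ofList]
  rw [getD_map_range n i hi]

theorem get_all_orientations_main (p : List String) :
    get_all_orientations p = get_all_orientations_alt p := by
  set n := p.length with hn
  have h1 : rotate_pattern p = buildB n p (fun i j => (n - 1 - j, i)) :=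
    rotate_eq_buildB p
  have h2 : rotate_pattern (rotate_pattern p) =
      buildB n p (fun i j => (n - 1 - i, n - 1 - j)) := by
    rw [h1, rotate_buildB n p _ hn]
  have h3 : rotate_pattern (rotate_pattern (rotate_pattern p)) =
      buildB n p (fun i j => (j, n - 1 - i)) := by
    rw [h2, rotate_buildB n p _ hn]
    exact buildB_congr n p _ _ (by intro i hi j hj; simp; omega)
  have hf1 : flip_pattern (rotate_pattern p) = buildB n p (fun i j => (j, i)) := by
    rw [h1, flip_buildB]
    exact buildB_congr n p _ _ (by intro i hi j hj; simp; omega)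
  have hf2 : flip_pattern (rotate_pattern (rotate_pattern p)) =
      buildB n p (fun i j => (n - 1 - i, j)) := by
    rw [h2, flip_buildB]
    exact buildB_congr n p _ _ (by intro i hi j hj; simp; omega)
  have hf3 : flip_pattern (rotate_pattern (rotate_pattern (rotate_pattern p))) =
      buildB n p (fun i j => (n - 1 - j, n - 1 - i)) := by
    rw [h3, flip_buildB]
  have hr4 : List.range 4 = [0, 1, 2, 3] := by decide
  unfold get_all_orientations get_all_orientations_alt
  rw [hr4]
  simp only [List.foldl_cons, List.foldl_nil]
  rw [hf3, h3, hf2, h2, hf1, h1]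
  simp only [flip_pattern, hn]

-- ===== VERDICT (by name: the statement is the Claim_ definition above) =====
theorem get_all_orientations_spec : Claim_equal_get_all_orientations := by
  intro pattern _dom _hpre
  exact get_all_orientations_main pattern
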